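-- pv_equiv track=rewrite | github.com/tony-728/Algorithm | python/programmers/Lev2/디팬스게임.py | solution
-- ===== SOURCE A (Python) =====
-- from heapq import heappush, heappop
-- from heapq import heappush, heappop
-- from heapq import heappush, heappop
--
-- def solution(n, k, enemy):
--     answer = 0
--
--     if k >= len(enemy):
--         answer = len(enemy)
--
--     else:
--         heap = []
--
--         for e in enemy:
--             # 지금 턴에 무적권을 쓸 수있는 것을 배제하고 생각한거임
--             if n >= e:
--                 n -= e
--                 heappush(heap, -e)
--             else:
--                 if k > 0:
--                     n -= heappop(heap)
--                     n -= e
--                     heappush(heap, -e)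
--                     k -= 1
--                 else:
--                     break
--             answer += 1
--
--     return answer
-- ===== SOURCE B (Python) =====
-- def solution(n, k, enemy):
--     # Same greedy, but without heapq: keep the waves paid so far as a plain
--     # list and, on a shield event, refund the largest paid wave found by a
--     # direct scan (max + remove); no negation trick, no special case for
--     # k >= len(enemy).
--     rounds = 0
--     paid = []
--     for e in enemy:
--         if n < e:
--             if k <= 0:
--                 break
--             if paid:
--                 m = max(paid)
--                 paid.remove(m)
--                 n += m
--             k -= 1
--             n -= e
--         else:
--             n -= e
--         paid.append(e)
--         rounds += 1
--     return rounds
-- ===== Notes on version B (the rewrite author's own statement) =====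
-- stated objective: simpler
-- what changed: B drops the heapq min-heap of negated values and the k>=len(enemy) shortcut branch: it keeps the paid waves as a plain list and, at a shield event, refunds the largest paid wave found by a direct max()+remove() scan, with a single unconditional append/round-count site; the k>=len case falls out of the uniform loop.
import Mathlib
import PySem

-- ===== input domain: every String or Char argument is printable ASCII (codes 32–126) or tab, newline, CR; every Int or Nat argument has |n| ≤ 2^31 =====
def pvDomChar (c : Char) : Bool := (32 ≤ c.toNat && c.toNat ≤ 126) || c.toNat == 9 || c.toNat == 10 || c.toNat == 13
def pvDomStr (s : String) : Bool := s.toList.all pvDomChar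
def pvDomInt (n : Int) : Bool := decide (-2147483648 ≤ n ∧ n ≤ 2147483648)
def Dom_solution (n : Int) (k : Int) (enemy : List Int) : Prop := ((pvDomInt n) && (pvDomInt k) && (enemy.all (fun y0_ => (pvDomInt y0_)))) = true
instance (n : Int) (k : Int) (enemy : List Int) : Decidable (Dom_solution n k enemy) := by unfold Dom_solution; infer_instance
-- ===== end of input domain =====

-- B replaces A's heapq min-heap (of negated values) and A's k ≥ len(enemy) shortcut by a
-- uniform loop over a plain list of paid waves, scanning for the maximum at shield events
-- (objective: simpler). Return-value equivalence only; neither version mutates its arguments.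

-- ===== PORT A =====
-- heapq is modelled as a bag (list) of Ints: heappop returns the minimum element and removes
-- its first occurrence — exact on the returned values, which is all A observes of the heap.
-- heappop of an empty heap raises IndexError in Python; the port's `.getD 0` there is
-- unreachable inside Pre_solution.
def loopA : List Int → Int → Int → List Int → Int → Int
  | [], _n, _k, _heap, ans => ans
  | e :: rest, n, k, heap, ans =>
    if e ≤ n then
      loopA rest (n - e) k ((-e) :: heap) (ans + 1)
    else if 0 < k then
      let m := heap.min?.getD 0
      loopA rest (n - m - e) (k - 1) ((-e) :: heap.erase m) (ans + 1)
    else ans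

def solution (n : Int) (k : Int) (enemy : List Int) : Int :=
  if (enemy.length : Int) ≤ k then (enemy.length : Int)
  else loopA enemy n k [] 0

-- ===== PORT B =====
def loopB : List Int → Int → Int → List Int → Int → Int
  | [], _n, _k, _paid, rounds => rounds
  | e :: rest, n, k, paid, rounds =>
    if n < e then
      if k ≤ 0 then rounds
      else
        match paid.max? with
        | none => loopB rest (n - e) (k - 1) (paid ++ [e]) (rounds + 1)
        | some m => loopB rest (n + m - e) (k - 1) (paid.erase m ++ [e]) (rounds + 1)
    else loopB rest (n - e) k (paid ++ [e]) (rounds + 1)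

def solution_alt (n : Int) (k : Int) (enemy : List Int) : Int :=
  loopB enemy n k [] 0

-- ===== PRECONDITION & SPEC =====
-- Pre_ excludes exactly the inputs on which A raises IndexError (empty-heap heappop):
-- 0 < k < len(enemy) with the first enemy already unaffordable.
def Pre_solution (n : Int) (k : Int) (enemy : List Int) : Prop :=
  0 < k ∧ k < (enemy.length : Int) → enemy.headI ≤ n
instance (n : Int) (k : Int) (enemy : List Int) : Decidable (Pre_solution n k enemy) := by
  unfold Pre_solution; infer_instance
def pvWitness_solution : Int × Int × List Int := (10, 1, [3, 4, 5])

def Spec_solution (n : Int) (k : Int) (enemy : List Int) (out : Int) : Prop := out = solution_alt n k enemy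
instance (n : Int) (k : Int) (enemy : List Int) (out : Int) : Decidable (Spec_solution n k enemy out) := by unfold Spec_solution; infer_instance

-- ===== CLAIM (what is proved, stated in full; the proofs are below) =====
def Claim_equal_solution : Prop := ∀ (n : Int) (k : Int) (enemy : List Int), Dom_solution n k enemy → Pre_solution n k enemy → Spec_solution n k enemy (solution n k enemy)

-- ===== LEMMAS AND PROOFS =====

-- With enough shields for every remaining wave, B's loop survives all of them.
theorem loopB_all (rest : List Int) : ∀ (n k : Int) (paid : List Int) (r : Int),
    (rest.length : Int) ≤ k → loopB rest n k paid r = r + rest.length := by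
  induction rest with
  | nil => intro n k paid r _; simp [loopB]
  | cons e rest ih =>
    intro n k paid r hk
    simp only [List.length_cons] at hk
    push_cast at hk
    have hk0 : ¬ k ≤ 0 := by omega
    have hk1 : (rest.length : Int) ≤ k - 1 := by omega
    by_cases hne : n < e
    · simp only [loopB, if_pos hne, if_neg hk0]
      cases hmax : paid.max? with
      | none =>
        rw [ih _ _ _ _ hk1]; simp only [List.length_cons]; push_cast; omega
      | some m =>
        simp only [ih _ _ _ _ hk1, List.length_cons]; push_cast; omega
    · simp only [loopB, if_neg hne]
      rw [ih _ _ _ _ (by omega : (rest.length : Int) ≤ k)]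
      simp only [List.length_cons]; push_cast; omega

theorem min?_neg_of_max? {paid heap : List Int} {M : Int}
    (hperm : heap.Perm (paid.map (fun x => -x))) (hmax : paid.max? = some M) :
    heap.min? = some (-M) := by
  rw [List.max?_eq_some_iff] at hmax
  rw [List.min?_eq_some_iff]
  constructor
  · exact hperm.mem_iff.mpr (List.mem_map.mpr ⟨M, hmax.1, rfl⟩)
  · intro b hb
    have hb' := hperm.mem_iff.mp hb
    rcases List.mem_map.mp hb' with ⟨c, hc, rfl⟩
    have := hmax.2 c hc
    omega

-- Core invariant: A's heap is (as a multiset) the negation of B's paid list; when paid is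
-- nonempty the two loops return the same answer.
theorem loopAB (rest : List Int) : ∀ (n k : Int) (heap paid : List Int) (ans : Int),
    heap.Perm (paid.map (fun x => -x)) → paid ≠ [] →
    loopA rest n k heap ans = loopB rest n k paid ans := by
  induction rest with
  | nil => intro n k heap paid ans _ _; simp [loopA, loopB]
  | cons e rest ih =>
    intro n k heap paid ans hperm hne
    by_cases hpay : e ≤ n
    · have : ¬ n < e := by omega
      simp only [loopA, loopB, if_pos hpay, if_neg this]
      apply ih
      · calc ((-e) :: heap).Perm ((-e) :: paid.map (fun x => -x)) := hperm.cons _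
          _ = ((e :: paid).map (fun x => -x)) := rfl
          _ |>.Perm ((paid ++ [e]).map (fun x => -x)) := by
              rw [List.map_append]
              exact (List.perm_append_singleton _ _).symm
      · simp
    · have hlt : n < e := by omega
      simp only [loopA, loopB, if_neg hpay, if_pos hlt]
      by_cases hk : 0 < k
      · have hk' : ¬ k ≤ 0 := by omega
        simp only [if_pos hk, if_neg hk']
        cases hmax : paid.max? with
        | none => exact absurd (List.max?_eq_none_iff.mp hmax) hne
        | some M =>
          have hmin : heap.min? = some (-M) := min?_neg_of_max? hperm hmax
          simp only [hmin, Option.getD_some]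
          have harith : n - -M - e = n + M - e := by ring
          rw [harith]
          apply ih
          · have h1 : (heap.erase (-M)).Perm ((paid.map (fun x => -x)).erase (-M)) :=
              hperm.erase _
            have h2 : (paid.map (fun x => -x)).erase (-M) = (paid.erase M).map (fun x => -x) := by
              rw [List.map_erase (neg_injective : Function.Injective (fun x : Int => -x))]
            calc ((-e) :: heap.erase (-M)).Perm ((-e) :: (paid.erase M).map (fun x => -x)) :=
                (h1.trans (h2 ▸ List.Perm.refl _)).cons _
              _ = ((e :: paid.erase M).map (fun x => -x)) := rfl
              _ |>.Perm ((paid.erase M ++ [e]).map (fun x => -x)) := by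
                  rw [List.map_append]
                  exact (List.perm_append_singleton _ _).symm
          · simp
      · have hk' : k ≤ 0 := by omega
        simp [if_neg hk, if_pos hk']

-- ===== VERDICT (by name: the statement is the Claim_ definition above) =====
theorem solution_spec : Claim_equal_solution := by
  intro n k enemy _ hpre
  unfold Spec_solution solution solution_alt
  by_cases hshort : (enemy.length : Int) ≤ k
  · rw [if_pos hshort, loopB_all _ _ _ _ _ hshort]; omega
  · rw [if_neg hshort]
    cases enemy with
    | nil => simp at hshort; simp [loopA, loopB]
    | cons e rest =>
      by_cases hpay : e ≤ n
      · have : ¬ n < e := by omega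
        simp only [loopA, loopB, if_pos hpay, if_neg this]
        apply loopAB <;> simp
      · have hlt : n < e := by omega
        have hk : ¬ 0 < k := by
          intro hk0
          have hh : (e :: rest).headI ≤ n :=
            hpre ⟨hk0, by simp only [List.length_cons] at hshort ⊢; push_cast at hshort ⊢; omega⟩
          simp only [List.headI_cons] at hh
          omega
        have hk' : k ≤ 0 := by omega
        simp [loopA, loopB, if_neg hpay, if_pos hlt, if_neg hk, if_pos hk']
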